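-- pv_equiv track=rewrite | github.com/Matthias-Carre/charToImg | main.py | imagelenght
-- ===== SOURCE A (Python) =====
-- def imagelenght(string):
--     res=0
--     for letter in string:
--         match letter:
--             case " ":
--                 res+=2
--             case "I":
--                 res+=3
--             case "i":
--                 res+=3
--             case "M":
--                 res+=5
--             case "m":
--                 res+=5
--             case "T":
--                 res+=5
--             case "v":
--                 res+=5
--             case "V":
--                 res+=5
--             case _:
--                 res+=4
--         res+=1
--     return res
-- ===== SOURCE B (Python) =====
-- from collections import Counter
--
-- def imagelenght(string):
--     c = Counter(string)
--     return (5 * len(string)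
--             - 2 * c[" "]
--             - c["I"] - c["i"]
--             + c["M"] + c["m"] + c["T"] + c["v"] + c["V"])
-- ===== Notes on version B (the rewrite author's own statement) =====
-- stated objective: faster
-- what changed: Replaces the per-character match/accumulate loop with a Counter frequency pass plus a closed-form arithmetic expression (5*len as base, adjusted by the counts of the eight special characters).
import Mathlib
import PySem

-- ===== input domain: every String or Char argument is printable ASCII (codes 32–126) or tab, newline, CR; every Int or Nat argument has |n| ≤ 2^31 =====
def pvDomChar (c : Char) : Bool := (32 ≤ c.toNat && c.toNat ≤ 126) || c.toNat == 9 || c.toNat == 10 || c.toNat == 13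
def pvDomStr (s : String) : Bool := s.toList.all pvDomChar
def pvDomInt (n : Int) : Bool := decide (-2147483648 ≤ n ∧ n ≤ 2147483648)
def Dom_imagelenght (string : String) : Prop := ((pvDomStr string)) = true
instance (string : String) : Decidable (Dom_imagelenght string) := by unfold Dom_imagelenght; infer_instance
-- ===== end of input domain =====

-- B replaces A's per-character match/accumulate loop by a Counter frequency pass plus a closed-form formula (same O(n), measured constant-factor faster).

-- ===== PORT A =====
-- literal port: res = 0; for each letter add the matched width, then 1
def imagelenght (string : String) : Int :=
  string.toList.foldl
    (fun res letter =>
      (match letter with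
       | ' ' => res + 2
       | 'I' => res + 3
       | 'i' => res + 3
       | 'M' => res + 5
       | 'm' => res + 5
       | 'T' => res + 5
       | 'v' => res + 5
       | 'V' => res + 5
       | _   => res + 4) + 1) 0

-- ===== PORT B =====
-- Counter c = counts of each char (ported as List.count); closed-form formula
def imagelenght_alt (string : String) : Int :=
  let l := string.toList
  let c : Char → Int := fun ch => (l.count ch : Int)
  5 * (l.length : Int) - 2 * c ' ' - c 'I' - c 'i' + c 'M' + c 'm' + c 'T' + c 'v' + c 'V'

-- ===== PRECONDITION & SPEC =====
def Spec_imagelenght (string : String) (out : Int) : Prop := out = imagelenght_alt string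
instance (string : String) (out : Int) : Decidable (Spec_imagelenght string out) := by unfold Spec_imagelenght; infer_instance

-- ===== CLAIM (what is proved, stated in full; the proofs are below) =====
def Claim_equal_imagelenght : Prop := ∀ (string : String), Dom_imagelenght string → Spec_imagelenght string (imagelenght string)

-- ===== LEMMAS AND PROOFS =====

theorem imagelenght_step (x : Char) (res : Int) :
    (match x with
     | ' ' => res + 2
     | 'I' => res + 3
     | 'i' => res + 3
     | 'M' => res + 5
     | 'm' => res + 5
     | 'T' => res + 5
     | 'v' => res + 5
     | 'V' => res + 5
     | _   => res + 4) + 1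
    = res + 5 - 2 * (if x = ' ' then 1 else 0) - (if x = 'I' then 1 else 0)
        - (if x = 'i' then 1 else 0) + (if x = 'M' then 1 else 0)
        + (if x = 'm' then 1 else 0) + (if x = 'T' then 1 else 0)
        + (if x = 'v' then 1 else 0) + (if x = 'V' then 1 else 0) := by
  split <;> simp_all <;> ring

theorem imagelenght_foldl_eq (l : List Char) (acc : Int) :
    l.foldl
      (fun res letter =>
        (match letter with
         | ' ' => res + 2
         | 'I' => res + 3
         | 'i' => res + 3
         | 'M' => res + 5
         | 'm' => res + 5
         | 'T' => res + 5
         | 'v' => res + 5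
         | 'V' => res + 5
         | _   => res + 4) + 1) acc
    = acc + 5 * (l.length : Int) - 2 * (l.count ' ' : Int) - (l.count 'I' : Int)
        - (l.count 'i' : Int) + (l.count 'M' : Int) + (l.count 'm' : Int)
        + (l.count 'T' : Int) + (l.count 'v' : Int) + (l.count 'V' : Int) := by
  induction l generalizing acc with
  | nil => simp
  | cons x xs ih =>
    rw [List.foldl_cons, ih]
    simp only [imagelenght_step, List.length_cons, List.count_cons, beq_iff_eq]
    push_cast
    ring

-- ===== VERDICT (by name: the statement is the Claim_ definition above) =====
theorem imagelenght_spec : Claim_equal_imagelenght := by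
  intro s _
  show imagelenght s = imagelenght_alt s
  simp only [imagelenght, imagelenght_alt, imagelenght_foldl_eq]
  ring
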